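-- pv_equiv track=rewrite | github.com/JaeHong-Ahn/CodeTest | 프로그래머스/lv2/87946. 피로도/피로도.py | solution
-- ===== SOURCE A (Python) =====
-- def solution(k, dungeons):
--     answer = []
--
--     def recursion(k, cnt, visited, dungeons):
--         for i in range(len(dungeons)):
--             answer.append(cnt)
--             if visited[i] == False and k >= dungeons[i][0]:
--                 visited[i] = True
--                 recursion(k-dungeons[i][1],cnt+1,visited, dungeons)
--                 visited[i] = False
--
--         return answer
--     visited = [False] * len(dungeons)
--     recursion(k,0,visited,dungeons)
--
--     return max(answer)
-- ===== SOURCE B (Python) =====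
-- def solution(k, dungeons):
--     # Enumerate every ordering of the dungeons explicitly and walk each one.
--     def perms(xs):
--         if not xs:
--             return [[]]
--         out = []
--         for j in range(len(xs)):
--             rest = xs[:j] + xs[j + 1:]
--             for p in perms(rest):
--                 out.append([xs[j]] + p)
--         return out
--
--     best = 0
--     for order in perms(dungeons):
--         fatigue = k
--         cnt = 0
--         for d in order:
--             if fatigue >= d[0]:
--                 cnt += 1
--                 fatigue -= d[1]
--             else:
--                 break
--         best = max(best, cnt)
--     return best
-- ===== Notes on version B (the rewrite author's own statement) =====
-- stated objective: alternative
-- what changed: Replaces the pruned recursive backtracking (shared visited array, global list collecting the depth at every tree node, max() at the end) by explicit two-phase brute force: generate the list of all orderings of the dungeons, then walk each ordering with a running fatigue, breaking at the first infeasible dungeon, and keep a running maximum of the counts.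
-- outside the precondition, e.g. on solution(3, [[5]]): A returns 0, B returns 0; on solution(5, []): A raises ValueError, B returns 0
-- crash fix: On empty dungeons A raises ValueError (max() of the empty answer list); B naturally returns 0 (the single empty ordering clears 0 dungeons). — e.g. on solution(5, []): A raises ValueError, B returns 0
import Mathlib
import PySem

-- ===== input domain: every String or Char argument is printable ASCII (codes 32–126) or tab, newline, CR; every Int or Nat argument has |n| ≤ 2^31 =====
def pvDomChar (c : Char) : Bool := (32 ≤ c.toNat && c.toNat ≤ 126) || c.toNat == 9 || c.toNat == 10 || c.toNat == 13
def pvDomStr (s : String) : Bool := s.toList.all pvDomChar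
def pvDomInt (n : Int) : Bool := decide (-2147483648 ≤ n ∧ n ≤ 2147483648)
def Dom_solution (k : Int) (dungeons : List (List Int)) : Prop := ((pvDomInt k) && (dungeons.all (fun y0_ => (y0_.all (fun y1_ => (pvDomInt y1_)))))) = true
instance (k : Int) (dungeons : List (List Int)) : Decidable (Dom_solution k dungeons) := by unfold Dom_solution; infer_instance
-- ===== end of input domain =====

-- B replaces A's pruned backtracking (visited flags + global list of node depths + max())
-- by explicit brute force: build the list of all orderings, walk each one, keep a running max.

-- ===== PORT A =====
-- termination helper for the port: clearing an unvisited dungeon decreases the number of `false` flags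
theorem pvCountPSetTrueLt (v : List Bool) (i : Nat) (h : v.getD i true = false) :
    (v.set i true).countP (· = false) < v.countP (· = false) := by
  induction v generalizing i with
  | nil => simp [List.getD] at h
  | cons b t ih =>
    cases i with
    | zero =>
      simp [List.getD] at h
      subst h
      simp
    | succ j =>
      have h' : t.getD j true = false := by simpa [List.getD] using h
      have := ih j h'
      simp only [List.set, List.countP_cons]
      omega

-- the nested helper `recursion` of A: loop index i made explicit, `answer` threaded as an accumulator
def pvRecA (ds : List (List Int)) (k cnt : Int) (visited : List Bool) (i : Nat) (answer : List Int) : List Int :=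
  if hi : i < ds.length then
    let answer' := answer ++ [cnt]
    if hv : visited.getD i true = false ∧ (ds.getD i []).getD 0 0 ≤ k then
      let answer'' := pvRecA ds (k - (ds.getD i []).getD 1 0) (cnt + 1) (visited.set i true) 0 answer'
      pvRecA ds k cnt visited (i + 1) answer''
    else
      pvRecA ds k cnt visited (i + 1) answer'
  else
    answer
termination_by (visited.countP (· = false), ds.length - i)
decreasing_by
  · exact Prod.Lex.left _ _ (pvCountPSetTrueLt visited i hv.1)
  · exact Prod.Lex.right _ (by omega)
  · exact Prod.Lex.right _ (by omega)

def solution (k : Int) (dungeons : List (List Int)) : Int :=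
  let visited := List.replicate dungeons.length false
  let answer := pvRecA dungeons k 0 visited 0 []
  (PySem.List.max? answer (fun x => x)).getD 0   -- python max(answer); the none case (empty) is excluded by Pre_

-- ===== PORT B =====
-- helper perms(xs): the list of all orderings of xs, built by choosing each position j first
def pvPermsB (xs : List (List Int)) : List (List (List Int)) :=
  if xs = [] then [[]]
  else
    (List.range xs.length).attach.foldl
      (fun out j =>
        (pvPermsB (xs.eraseIdx j.1)).foldl (fun out p => out ++ [xs.getD j.1 [] :: p]) out)
      []
termination_by xs.length
decreasing_by
  have hj := List.mem_range.mp j.2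
  have : xs.length ≠ 0 := by
    intro h0; exact absurd (List.eq_nil_of_length_eq_zero h0) (by assumption)
  rw [List.length_eraseIdx_of_lt hj]
  omega

-- the walk of one ordering: running fatigue and count, break at the first infeasible dungeon
def pvWalkB (fatigue cnt : Int) : List (List Int) → Int
  | [] => cnt
  | d :: t => if (d.getD 0 0) ≤ fatigue then pvWalkB (fatigue - d.getD 1 0) (cnt + 1) t else cnt

def solution_alt (k : Int) (dungeons : List (List Int)) : Int :=
  (pvPermsB dungeons).foldl (fun best order => max best (pvWalkB k 0 order)) 0

-- ===== PRECONDITION & SPEC =====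
-- Pre_ excludes the inputs on which python A raises: the empty dungeon list (ValueError from
-- max() of the empty answer list) and inner lists shorter than a [requirement, cost] pair
-- (IndexError whenever such an entry is examined); this restricts to the natural domain of
-- [req, cost] pairs and also drops some short-entry inputs A happens to return on (see claim cites).
def Pre_solution (k : Int) (dungeons : List (List Int)) : Prop :=
  dungeons ≠ [] ∧ ∀ d ∈ dungeons, 2 ≤ d.length
instance (k : Int) (dungeons : List (List Int)) : Decidable (Pre_solution k dungeons) := by
  unfold Pre_solution; infer_instance

def pvWitness_solution : Int × List (List Int) := (80, [[80, 20], [50, 40], [30, 10]])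

-- On empty dungeons A raises ValueError (max() of an empty list); B returns 0.
def Raises_solution (k : Int) (dungeons : List (List Int)) : Prop := dungeons = []
instance (k : Int) (dungeons : List (List Int)) : Decidable (Raises_solution k dungeons) := by
  unfold Raises_solution; infer_instance
def pvRaiseWitness_solution : Int × List (List Int) := (5, [])
def pvRaiseWitnessOut_solution : Int := 0

def Spec_solution (k : Int) (dungeons : List (List Int)) (out : Int) : Prop := out = solution_alt k dungeons
instance (k : Int) (dungeons : List (List Int)) (out : Int) : Decidable (Spec_solution k dungeons out) := by unfold Spec_solution; infer_instance

-- ===== CLAIM (what is proved, stated in full; the proofs are below) =====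
def Claim_equal_solution : Prop := ∀ (k : Int) (dungeons : List (List Int)), Dom_solution k dungeons → Pre_solution k dungeons → Spec_solution k dungeons (solution k dungeons)
def Claim_raises_solution : Prop := (∀ (k : Int) (dungeons : List (List Int)), Dom_solution k dungeons → Raises_solution k dungeons → ¬ Pre_solution k dungeons) ∧ (Dom_solution (pvRaiseWitness_solution.1) (pvRaiseWitness_solution.2) ∧ Raises_solution (pvRaiseWitness_solution.1) (pvRaiseWitness_solution.2) ∧ solution_alt (pvRaiseWitness_solution.1) (pvRaiseWitness_solution.2) = pvRaiseWitnessOut_solution)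

-- ===== LEMMAS AND PROOFS =====

-- B's value as a function (definitionally solution_alt's body)
def pvBest (f : Int) (xs : List (List Int)) : Int :=
  (pvPermsB xs).foldl (fun best order => max best (pvWalkB f 0 order)) 0

-- the dungeons still available under a visited vector
def pvAvail (ds : List (List Int)) (v : List Bool) : List (List Int) :=
  ((List.range ds.length).filter (fun j => decide (v.getD j true = false))).map (fun j => ds.getD j [])

-- the best value contributed by A's loop from index i on (each cleared branch restarting at 0)
def pvTB (ds : List (List Int)) (f : Int) (v : List Bool) (i : Nat) : Int :=
  ((List.range ds.length).drop i).foldl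
    (fun b j => max b (if v.getD j true = false ∧ (ds.getD j []).getD 0 0 ≤ f
      then 1 + pvBest (f - (ds.getD j []).getD 1 0) (pvAvail ds (v.set j true)) else 0)) 0

-- ---- walk lemmas ----
theorem pvWalk_shift (t : List (List Int)) : ∀ f c, pvWalkB f c t = c + pvWalkB f 0 t := by
  induction t with
  | nil => intro f c; simp [pvWalkB]
  | cons d t ih =>
    intro f c
    simp only [pvWalkB]
    split_ifs with h
    · rw [ih _ (c + 1), ih _ (0 + 1)]; ring
    · omega

theorem pvWalk_nonneg (t : List (List Int)) : ∀ f, 0 ≤ pvWalkB f 0 t := by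
  induction t with
  | nil => intro f; simp [pvWalkB]
  | cons d t ih =>
    intro f
    simp only [pvWalkB]
    split_ifs with h
    · rw [pvWalk_shift]; have := ih (f - d.getD 1 0); omega
    · omega

-- ---- generic running-max fold lemmas ----
theorem pvFoldMax_nonneg {α : Type} (g : α → Int) :
    ∀ (l : List α) (b : Int), 0 ≤ b → 0 ≤ l.foldl (fun b x => max b (g x)) b := by
  intro l
  induction l with
  | nil => intro b hb; simpa using hb
  | cons x l ih =>
    intro b hb
    simp only [List.foldl_cons]
    exact ih _ (le_trans hb (le_max_left _ _))

theorem pvFoldMax_from {α : Type} (g : α → Int) (hg : ∀ x, 0 ≤ g x) :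
    ∀ (l : List α) (b : Int), 0 ≤ b →
      l.foldl (fun b x => max b (g x)) b = max b (l.foldl (fun b x => max b (g x)) 0) := by
  intro l
  induction l with
  | nil => intro b hb; simp only [List.foldl_nil]; omega
  | cons x l ih =>
    intro b hb
    simp only [List.foldl_cons]
    rw [ih _ (le_trans hb (le_max_left _ _)), ih _ (le_trans (hg x) (le_max_right 0 _)),
      max_assoc]
    have : max (0 : Int) (g x) = g x := by have := hg x; omega
    rw [this]

theorem pvFoldMax_one_add {α : Type} (g : α → Int) (hg : ∀ x, 0 ≤ g x) :
    ∀ (l : List α) (b : Int), 0 ≤ b →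
      l.foldl (fun b x => max b (1 + g x)) (1 + b) = 1 + l.foldl (fun b x => max b (g x)) b := by
  intro l
  induction l with
  | nil => intro b _; simp
  | cons x l ih =>
    intro b hb
    simp only [List.foldl_cons]
    have h1 : max (1 + b) (1 + g x) = 1 + max b (g x) := by omega
    rw [h1, ih _ (le_trans hb (le_max_left _ _))]

theorem pvFoldMax_filter {α : Type} (P : α → Bool) (w : α → Int) (hw : ∀ x, 0 ≤ w x) :
    ∀ (l : List α) (b : Int), 0 ≤ b →
      l.foldl (fun b x => max b (if P x then w x else 0)) b
        = (l.filter P).foldl (fun b x => max b (w x)) b := by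
  intro l
  induction l with
  | nil => intro b _; simp
  | cons x l ih =>
    intro b hb
    by_cases hx : P x
    · simp only [List.foldl_cons, List.filter_cons_of_pos hx, hx, if_true]
      exact ih _ (le_trans hb (le_max_left _ _))
    · have hx' : P x = false := by simpa using hx
      have hstep : max b (if P x = true then w x else 0) = b := by
        simp only [hx', Bool.false_eq_true, if_false]
        omega
      rw [List.foldl_cons, hstep, List.filter_cons_of_neg hx]
      exact ih _ hb

theorem pvFoldMax_zero {α : Type} : ∀ (l : List α) (b : Int), 0 ≤ b →
    l.foldl (fun b _ => max b (0 : Int)) b = b := by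
  intro l
  induction l with
  | nil => intro b _; simp
  | cons x l ih =>
    intro b hb
    simp only [List.foldl_cons]
    have : max b (0 : Int) = b := by omega
    rw [this]
    exact ih _ hb

-- ---- perms lemmas ----
theorem pvPerms_eq (xs : List (List Int)) (h : xs ≠ []) :
    pvPermsB xs = (List.range xs.length).attach.flatMap
      (fun j => (pvPermsB (xs.eraseIdx j.1)).map (fun p => xs.getD j.1 [] :: p)) := by
  rw [pvPermsB, if_neg h]
  simp only [PySem.List.foldl_append_singleton_eq_map]
  rw [PySem.List.foldl_append_eq_flatMap]
  simp

theorem pvPerms_ne_nil (xs : List (List Int)) : pvPermsB xs ≠ [] := by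
  by_cases h : xs = []
  · subst h; rw [pvPermsB]; simp
  · rw [pvPerms_eq xs h]
    have h0 : 0 < xs.length := List.length_pos_iff.mpr h
    obtain ⟨p, hp⟩ := List.exists_mem_of_ne_nil _ (pvPerms_ne_nil (xs.eraseIdx 0))
    intro hnil
    rw [List.eq_nil_iff_forall_not_mem] at hnil
    exact hnil (xs.getD 0 [] :: p)
      (List.mem_flatMap.mpr ⟨⟨0, List.mem_range.mpr h0⟩,
        List.mem_attach _ _, List.mem_map.mpr ⟨p, hp, rfl⟩⟩)
termination_by xs.length
decreasing_by
  have h0 : 0 < xs.length := List.length_pos_iff.mpr h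
  rw [List.length_eraseIdx_of_lt h0]
  omega

theorem pvBest_nonneg (f : Int) (xs : List (List Int)) : 0 ≤ pvBest f xs :=
  pvFoldMax_nonneg _ _ 0 le_rfl

theorem pvBest_nil (f : Int) : pvBest f [] = 0 := by
  rw [pvBest, pvPermsB]
  simp [pvWalkB]

theorem pvMW_flatMap {α : Type} (g : α → List (List (List Int))) (w : List (List Int) → Int)
    (hw : ∀ p, 0 ≤ w p) : ∀ (l : List α),
    (l.flatMap g).foldl (fun b p => max b (w p)) 0
      = l.foldl (fun b j => max b ((g j).foldl (fun b p => max b (w p)) 0)) 0 := by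
  intro l
  induction l with
  | nil => simp
  | cons a l ih =>
    have hA : 0 ≤ (g a).foldl (fun b p => max b (w p)) 0 := pvFoldMax_nonneg _ _ 0 le_rfl
    have hG : ∀ j : α, 0 ≤ (g j).foldl (fun b p => max b (w p)) 0 :=
      fun j => pvFoldMax_nonneg _ _ 0 le_rfl
    simp only [List.flatMap_cons, List.foldl_append, List.foldl_cons]
    rw [pvFoldMax_from w hw _ _ hA, ih]
    have h0 : max (0 : Int) ((g a).foldl (fun b p => max b (w p)) 0)
        = (g a).foldl (fun b p => max b (w p)) 0 := by omega
    rw [h0, pvFoldMax_from _ hG l _ hA]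

theorem pvMW_map_cons (f : Int) (d : List Int) (ps : List (List (List Int))) (hps : ps ≠ []) :
    (ps.map (d :: ·)).foldl (fun b p => max b (pvWalkB f 0 p)) 0
      = if (d.getD 0 0) ≤ f
          then 1 + ps.foldl (fun b p => max b (pvWalkB (f - d.getD 1 0) 0 p)) 0
          else 0 := by
  rw [List.foldl_map]
  have hwalk : ∀ p, pvWalkB f 0 (d :: p)
      = if (d.getD 0 0) ≤ f then 1 + pvWalkB (f - d.getD 1 0) 0 p else 0 := by
    intro p
    simp only [pvWalkB]
    split_ifs with h
    · rw [pvWalk_shift]; ring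
    · rfl
  split_ifs with hcond
  · obtain ⟨q, t, rfl⟩ : ∃ q t, ps = q :: t := by
      cases ps with
      | nil => exact absurd rfl hps
      | cons q t => exact ⟨q, t, rfl⟩
    rw [PySem.List.foldl_congr_mem _ _ (fun b p => max b (1 + pvWalkB (f - d.getD 1 0) 0 p)) _
      (by intro acc x _; rw [hwalk, if_pos hcond])]
    simp only [List.foldl_cons]
    have hq := pvWalk_nonneg q (f - d.getD 1 0)
    have h1 : max (0 : Int) (1 + pvWalkB (f - d.getD 1 0) 0 q) = 1 + pvWalkB (f - d.getD 1 0) 0 q := by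
      omega
    have h2 : max (0 : Int) (pvWalkB (f - d.getD 1 0) 0 q) = pvWalkB (f - d.getD 1 0) 0 q := by
      omega
    rw [h1, h2, pvFoldMax_one_add _ (fun p => pvWalk_nonneg p _) t _ hq]
  · rw [PySem.List.foldl_congr_mem _ _ (fun b _ => max b (0 : Int)) _
      (by intro acc x _; rw [hwalk, if_neg hcond])]
    exact pvFoldMax_zero ps 0 le_rfl

theorem pvBest_rec (f : Int) (xs : List (List Int)) (h : xs ≠ []) :
    pvBest f xs = (List.range xs.length).foldl
      (fun b j => max b (if (xs.getD j []).getD 0 0 ≤ f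
        then 1 + pvBest (f - (xs.getD j []).getD 1 0) (xs.eraseIdx j) else 0)) 0 := by
  rw [pvBest, pvPerms_eq xs h,
    pvMW_flatMap _ _ (fun p => pvWalk_nonneg p f)]
  rw [PySem.List.foldl_congr_mem _ _
    (fun b (j : {x // x ∈ List.range xs.length}) =>
      max b (if (xs.getD j.1 []).getD 0 0 ≤ f
        then 1 + pvBest (f - (xs.getD j.1 []).getD 1 0) (xs.eraseIdx j.1) else 0)) _
    (by
      intro acc j _
      rw [pvMW_map_cons f _ _ (pvPerms_ne_nil _)]
      rfl)]
  exact List.foldl_attach (l := List.range xs.length)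
    (f := fun b j => max b (if (xs.getD j []).getD 0 0 ≤ f
      then 1 + pvBest (f - (xs.getD j []).getD 1 0) (xs.eraseIdx j) else 0)) (b := 0)

-- ---- option-max / python max() lemmas ----
def pvOmax : Option Int → Option Int → Option Int
  | none, b => b
  | some x, none => some x
  | some x, some y => some (max x y)

def pvAmax (l : List Int) : Option Int := l.foldl (fun o x => pvOmax o (some x)) none

theorem pvOmax_assoc (a b c : Option Int) : pvOmax (pvOmax a b) c = pvOmax a (pvOmax b c) := by
  cases a <;> cases b <;> cases c <;> simp [pvOmax, max_assoc]

theorem pvAmax_from : ∀ (l : List Int) (o : Option Int),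
    l.foldl (fun o x => pvOmax o (some x)) o = pvOmax o (pvAmax l) := by
  intro l
  induction l with
  | nil => intro o; cases o <;> simp [pvAmax, pvOmax]
  | cons x l ih =>
    intro o
    simp only [List.foldl_cons]
    have hx : pvAmax (x :: l) = pvOmax (some x) (pvAmax l) := by
      rw [pvAmax, List.foldl_cons]
      exact ih _
    rw [hx, ← pvOmax_assoc]
    exact ih (pvOmax o (some x))

theorem pvAmax_append (l1 l2 : List Int) : pvAmax (l1 ++ l2) = pvOmax (pvAmax l1) (pvAmax l2) := by
  rw [pvAmax, List.foldl_append, ← pvAmax, pvAmax_from]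

theorem pvFoldSomeMax : ∀ (t : List Int) (a : Int),
    t.foldl (fun o x => pvOmax o (some x)) (some a) = some (t.foldl max a) := by
  intro t
  induction t with
  | nil => intro a; rfl
  | cons x t ih => intro a; simp only [List.foldl_cons]; exact ih (max a x)

theorem pvMaxq_eq_amax (l : List Int) : PySem.List.max? l (fun x => x) = pvAmax l := by
  cases l with
  | nil => simp [PySem.List.max?, pvAmax]
  | cons x t =>
    rw [PySem.List.max?_id_cons, pvAmax, List.foldl_cons]
    exact (pvFoldSomeMax t x).symm

-- ---- pvTB step lemmas ----
theorem pvTB_nonneg (ds : List (List Int)) (f : Int) (v : List Bool) (i : Nat) :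
    0 ≤ pvTB ds f v i := pvFoldMax_nonneg _ _ 0 le_rfl

theorem pvTB_ge (ds : List (List Int)) (f : Int) (v : List Bool) (i : Nat)
    (h : ds.length ≤ i) : pvTB ds f v i = 0 := by
  rw [pvTB, List.drop_eq_nil_of_le (by simpa using h)]
  rfl

theorem pvTB_step (ds : List (List Int)) (f : Int) (v : List Bool) (i : Nat)
    (h : i < ds.length) :
    pvTB ds f v i = max
      (if v.getD i true = false ∧ (ds.getD i []).getD 0 0 ≤ f
        then 1 + pvBest (f - (ds.getD i []).getD 1 0) (pvAvail ds (v.set i true)) else 0)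
      (pvTB ds f v (i + 1)) := by
  have hlt : i < (List.range ds.length).length := by simpa using h
  rw [pvTB, List.drop_eq_getElem_cons hlt, List.getElem_range, List.foldl_cons]
  have hw : ∀ j : Nat, 0 ≤ (if v.getD j true = false ∧ (ds.getD j []).getD 0 0 ≤ f
      then 1 + pvBest (f - (ds.getD j []).getD 1 0) (pvAvail ds (v.set j true)) else 0) := by
    intro j
    split_ifs with hc
    · have := pvBest_nonneg (f - (ds.getD j []).getD 1 0) (pvAvail ds (v.set j true)); omega
    · exact le_rfl
  have h0 : max (0 : Int) (if v.getD i true = false ∧ (ds.getD i []).getD 0 0 ≤ f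
      then 1 + pvBest (f - (ds.getD i []).getD 1 0) (pvAvail ds (v.set i true)) else 0)
      = (if v.getD i true = false ∧ (ds.getD i []).getD 0 0 ≤ f
      then 1 + pvBest (f - (ds.getD i []).getD 1 0) (pvAvail ds (v.set i true)) else 0) := by
    have := hw i; omega
  rw [h0, pvFoldMax_from _ hw _ _ (hw i), ← pvTB]

-- ---- the bridge: pvTB at 0 is B's value on the available dungeons ----
theorem pvGetD_false_lt (v : List Bool) (j : Nat) (h : v.getD j true = false) : j < v.length := by
  by_contra hge
  rw [List.getD_eq_default _ _ (by omega)] at h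
  exact Bool.true_eq_false.mp h

theorem pvFilterErase {P : Nat → Bool} (j : Nat) (hPj : P j = true) :
    ∀ (l : List Nat), l.Nodup → j ∈ l →
      l.filter (fun x => if x = j then false else P x) = (l.filter P).erase j := by
  intro l
  induction l with
  | nil => intro _ hm; cases hm
  | cons a l ih =>
    intro hnd hm
    by_cases haj : a = j
    · subst haj
      have hnotl : a ∉ l := (List.nodup_cons.mp hnd).1
      rw [List.filter_cons_of_neg (by simp), List.filter_cons_of_pos hPj,
        List.erase_cons_head]
      exact List.filter_congr (by
        intro x hx
        have : x ≠ a := fun hxa => hnotl (hxa ▸ hx)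
        simp [this])
    · have hjl : j ∈ l := by
        cases List.mem_cons.mp hm with
        | inl h => exact absurd h.symm haj
        | inr h => exact h
      have ihl := ih (List.nodup_cons.mp hnd).2 hjl
      cases hPa : P a with
      | true =>
        rw [List.filter_cons_of_pos (by simp [haj, hPa]), List.filter_cons_of_pos hPa,
          List.erase_cons_tail (by simp [haj]), ihl]
      | false =>
        rw [List.filter_cons_of_neg (by simp [haj, hPa]), List.filter_cons_of_neg (by simp [hPa]),
          ihl]

theorem pvAvail_set (ds : List (List Int)) (v : List Bool) (j : Nat)
    (hj : j < ds.length) (hvj : v.getD j true = false) :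
    pvAvail ds (v.set j true)
      = (((List.range ds.length).filter (fun x => decide (v.getD x true = false))).erase j).map
          (fun x => ds.getD x []) := by
  have hjv : j < v.length := pvGetD_false_lt v j hvj
  rw [pvAvail]
  rw [List.filter_congr (q := fun x => if x = j then false else decide (v.getD x true = false)) (by
    intro x _
    by_cases hxj : x = j
    · subst hxj
      have hset : (v.set x true).getD x true = true := by
        rw [List.getD_eq_getElem?_getD, List.getElem?_set_self hjv]
        rfl
      rw [hset]
      simp
    · have hg : (v.set j true).getD x true = v.getD x true := by
        rw [List.getD_eq_getElem?_getD, List.getD_eq_getElem?_getD,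
          List.getElem?_set_ne (fun h => hxj h.symm)]
      rw [hg]
      simp [hxj])]
  rw [pvFilterErase j (by simpa using hvj) _ (List.nodup_range) (List.mem_range.mpr hj)]

theorem pvFoldRangeGetD {β : Type} (H : β → Nat → β) :
    ∀ (u : List Nat) (b : β),
      (List.range u.length).foldl (fun b p => H b (u.getD p 0)) b = u.foldl H b := by
  intro u
  induction u using List.reverseRecOn with
  | nil => intro b; simp
  | append_singleton u x ih =>
    intro b
    rw [List.length_append, List.length_singleton, List.range_succ, List.foldl_append,
      List.foldl_append]
    rw [PySem.List.foldl_congr_mem (List.range u.length) _ (fun b p => H b (u.getD p 0)) b (by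
      intro acc p hp
      have hplt : p < u.length := List.mem_range.mp hp
      rw [List.getD_append _ _ _ _ hplt])]
    rw [ih b]
    simp only [List.foldl_cons, List.foldl_nil]
    congr 1
    rw [List.getD_eq_getElem _ _ (by simp), List.getElem_append_right (by omega)]
    simp

theorem pvTB_eq_best (ds : List (List Int)) (f : Int) (v : List Bool) :
    pvTB ds f v 0 = pvBest f (pvAvail ds v) := by
  classical
  set u := (List.range ds.length).filter (fun x => decide (v.getD x true = false)) with hu
  have hund : u.Nodup := List.Nodup.filter _ List.nodup_range
  have humem : ∀ x ∈ u, x < ds.length ∧ v.getD x true = false := by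
    intro x hx
    have := List.mem_filter.mp hx
    exact ⟨List.mem_range.mp this.1, by simpa using this.2⟩
  have hw : ∀ j : Nat, 0 ≤ (if (ds.getD j []).getD 0 0 ≤ f
      then 1 + pvBest (f - (ds.getD j []).getD 1 0) ((u.erase j).map (fun x => ds.getD x [])) else 0) := by
    intro j
    split_ifs with hc
    · have := pvBest_nonneg (f - (ds.getD j []).getD 1 0) ((u.erase j).map (fun x => ds.getD x []))
      omega
    · exact le_rfl
  -- left side: fold over range, filter to u
  have hL : pvTB ds f v 0
      = u.foldl (fun b j => max b (if (ds.getD j []).getD 0 0 ≤ f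
          then 1 + pvBest (f - (ds.getD j []).getD 1 0) ((u.erase j).map (fun x => ds.getD x []))
          else 0)) 0 := by
    rw [pvTB, List.drop_zero]
    rw [PySem.List.foldl_congr_mem _ _
      (fun b j => max b (if decide (v.getD j true = false)
        then (if (ds.getD j []).getD 0 0 ≤ f
          then 1 + pvBest (f - (ds.getD j []).getD 1 0) ((u.erase j).map (fun x => ds.getD x []))
          else 0)
        else 0)) _ (by
        intro acc j hj
        congr 1
        by_cases hvj : v.getD j true = false
        · by_cases hfj : (ds.getD j []).getD 0 0 ≤ f
          · rw [if_pos (⟨hvj, hfj⟩ : _ ∧ _), if_pos (by simpa using hvj), if_pos hfj,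
              pvAvail_set ds v j (List.mem_range.mp hj) hvj]
          · rw [if_neg (fun hc => hfj hc.2), if_pos (by simpa using hvj), if_neg hfj]
        · rw [if_neg (fun hc => hvj hc.1), if_neg (by simpa using hvj)])]
    rw [pvFoldMax_filter _ _ hw _ _ le_rfl, ← hu]
  rw [hL]
  -- right side
  by_cases hunil : u = []
  · rw [hunil]
    have : pvAvail ds v = [] := by rw [pvAvail, ← hu, hunil]; rfl
    rw [this, pvBest_nil]
    rfl
  · have havail : pvAvail ds v = u.map (fun x => ds.getD x []) := by rw [pvAvail, ← hu]
    have havnil : pvAvail ds v ≠ [] := by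
      rw [havail]; simpa using hunil
    rw [pvBest_rec f _ havnil, havail, List.length_map]
    rw [PySem.List.foldl_congr_mem (List.range u.length) _
      (fun b p => max b (if (ds.getD (u.getD p 0) []).getD 0 0 ≤ f
        then 1 + pvBest (f - (ds.getD (u.getD p 0) []).getD 1 0)
          ((u.erase (u.getD p 0)).map (fun x => ds.getD x []))
        else 0)) _ (by
        intro acc p hp
        have hplt : p < u.length := List.mem_range.mp hp
        have hg1 : (u.map (fun x => ds.getD x [])).getD p [] = ds.getD (u.getD p 0) [] := by
          rw [List.getD_eq_getElem _ _ (by simpa using hplt), List.getElem_map,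
            List.getD_eq_getElem _ _ hplt]
        have hg2 : (u.map (fun x => ds.getD x [])).eraseIdx p
            = (u.erase (u.getD p 0)).map (fun x => ds.getD x []) := by
          rw [List.eraseIdx_map, List.getD_eq_getElem _ _ hplt,
            List.Nodup.erase_getElem hund p hplt]
        rw [hg1, hg2])]
    rw [pvFoldRangeGetD
      (fun b j => max b (if (ds.getD j []).getD 0 0 ≤ f
        then 1 + pvBest (f - (ds.getD j []).getD 1 0) ((u.erase j).map (fun x => ds.getD x []))
        else 0)) u 0]

-- ---- A's recursion collects exactly max (acc, cnt + pvTB) ----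
theorem pvOmax_none_right (o : Option Int) : pvOmax o none = o := by cases o <;> rfl

theorem pvAmax_singleton (x : Int) : pvAmax [x] = some x := rfl

theorem pvRecA_amax (ds : List (List Int)) (k cnt : Int) (v : List Bool) (i : Nat)
    (ans : List Int) :
    pvAmax (pvRecA ds k cnt v i ans)
      = pvOmax (pvAmax ans) (if i < ds.length then some (cnt + pvTB ds k v i) else none) := by
  induction k, cnt, v, i, ans using pvRecA.induct ds with
  | case1 k cnt v i ans hi ha' hcond ha'' ihInner ihInner' ihNext =>
    have h0 : 0 < ds.length := by omega
    have hB := pvBest_nonneg (k - (ds.getD i []).getD 1 0) (pvAvail ds (v.set i true))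
    have hT := pvTB_nonneg ds k v (i + 1)
    clear ihInner
    rw [pvRecA, dif_pos hi]
    simp only [dif_pos hcond]
    rw [ihNext, ihInner', if_pos h0, pvTB_eq_best ds (k - (ds.getD i []).getD 1 0) (v.set i true),
      pvAmax_append, pvAmax_singleton, if_pos hi, pvTB_step ds k v i hi, if_pos hcond,
      pvOmax_assoc, pvOmax_assoc]
    congr 1
    by_cases hi1 : i + 1 < ds.length
    · rw [if_pos hi1]
      show some _ = some _
      congr 1
      omega
    · rw [if_neg hi1, pvOmax_none_right, pvTB_ge ds k v (i + 1) (by omega)]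
      show some _ = some _
      congr 1
      omega
  | case2 k cnt v i ans hi ha' hcond ih =>
    have hT := pvTB_nonneg ds k v (i + 1)
    rw [pvRecA, dif_pos hi]
    simp only [dif_neg hcond]
    rw [ih, pvAmax_append, pvAmax_singleton, if_pos hi, pvTB_step ds k v i hi, if_neg hcond,
      pvOmax_assoc]
    congr 1
    by_cases hi1 : i + 1 < ds.length
    · rw [if_pos hi1]
      show some _ = some _
      congr 1
      omega
    · rw [if_neg hi1, pvOmax_none_right, pvTB_ge ds k v (i + 1) (by omega)]
      show some _ = some _
      congr 1
      omega
  | case3 k cnt v i ans hi =>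
    rw [pvRecA, dif_neg hi, if_neg hi, pvOmax_none_right]

-- ===== VERDICT (by name: the statement is the Claim_ definition above) =====
theorem solution_spec : Claim_equal_solution := by
  intro k ds _ hpre
  unfold Spec_solution
  obtain ⟨hne, _⟩ := hpre
  have hn : 0 < ds.length := List.length_pos_iff.mpr hne
  show solution k ds = solution_alt k ds
  have hs : solution k ds
      = (PySem.List.max? (pvRecA ds k 0 (List.replicate ds.length false) 0 []) (fun x => x)).getD 0 :=
    rfl
  rw [hs, pvMaxq_eq_amax, pvRecA_amax, if_pos hn]
  have h1 : pvAmax [] = none := rfl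
  rw [h1]
  have h2 : pvOmax none (some (0 + pvTB ds k (List.replicate ds.length false) 0))
      = some (pvTB ds k (List.replicate ds.length false) 0) := by
    simp [pvOmax]
  rw [h2]
  simp only [Option.getD_some]
  rw [pvTB_eq_best]
  have hav : pvAvail ds (List.replicate ds.length false) = ds := by
    rw [pvAvail]
    rw [List.filter_congr (q := fun _ => true) (by
      intro x hx
      rw [List.getD_replicate false (List.mem_range.mp hx)]
      simp)]
    rw [List.filter_true]
    apply List.ext_getElem (by simp)
    intro i h1' h2'
    simp only [List.getElem_map, List.getElem_range]
    rw [List.getD_eq_getElem _ _ (by simpa using h2')]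
  rw [hav]
  rfl

@[simp] theorem solution_raises : Claim_raises_solution := by
  unfold Claim_raises_solution
  refine ⟨fun k ds _ hr hp => hp.1 hr, by decide, rfl, ?_⟩
  show solution_alt 5 [] = 0
  rw [solution_alt, pvPermsB]
  simp [pvWalkB]
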